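-- pv_equiv track=rewrite | github.com/nahcikeel/Algorithm | 프로그래머스/1/140108. 문자열 나누기/문자열 나누기.py | solution
-- ===== SOURCE A (Python) =====
-- def solution(s):
--     answer = 0
--     i = 0
--
--     while i < len(s):
--         first_alp = s[i]
--         s_cnt, n_cnt = 1, 0
--         i += 1
--
--         while i < len(s):
--             if s[i] == first_alp:
--                 s_cnt += 1
--             else:
--                 n_cnt += 1
--             i += 1
--
--             if s_cnt == n_cnt:
--                 break
--
--         answer += 1
--
--
--     return answer
-- ===== SOURCE B (Python) =====
-- def solution(s):
--     # Groups always break at even positions (the running balance has the parity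
--     # of the number of characters consumed), so scan the string two characters
--     # at a time, testing the balance only at pair boundaries; a trailing odd
--     # character starts (and is) a final group exactly when the balance is zero.
--     answer = 0
--     bal = 0
--     f = ''
--     n = len(s)
--     for i in range(0, n - 1, 2):
--         c1, c2 = s[i], s[i + 1]
--         if bal == 0:
--             f = c1
--             answer += 1
--         bal += (1 if c1 == f else -1) + (1 if c2 == f else -1)
--     if n % 2 == 1 and bal == 0:
--         answer += 1
--     return answer
-- ===== Notes on version B (the rewrite author's own statement) =====
-- stated objective: alternative
-- what changed: Instead of A's nested while loops that re-test two counters after every character, B uses the parity invariant that groups can only end at even offsets: it scans the string two characters at a time, checks/updates the balance only at pair boundaries, and handles a trailing odd character with a separate rule.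
import Mathlib
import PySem

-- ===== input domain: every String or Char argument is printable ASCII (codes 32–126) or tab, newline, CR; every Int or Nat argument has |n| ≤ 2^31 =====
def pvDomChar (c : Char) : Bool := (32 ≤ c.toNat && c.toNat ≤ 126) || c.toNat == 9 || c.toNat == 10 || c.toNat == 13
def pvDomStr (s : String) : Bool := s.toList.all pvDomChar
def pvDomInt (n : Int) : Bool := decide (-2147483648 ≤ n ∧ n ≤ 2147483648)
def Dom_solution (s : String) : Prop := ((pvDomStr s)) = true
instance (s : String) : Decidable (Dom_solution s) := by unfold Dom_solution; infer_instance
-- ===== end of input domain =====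

-- B exploits the parity invariant that groups end only at even offsets: it scans the
-- string two characters at a time, testing the balance only at pair boundaries, with
-- a separate rule for a trailing odd character; objective: alternative.

-- ===== PORT A =====
-- inner while loop of A: consumes characters, updating s_cnt/n_cnt, breaking when
-- they become equal; returns the remaining suffix (the value of index i as a suffix).
def pvInnerA (first : Char) (sc nc : Int) : List Char → List Char
  | [] => []
  | c :: cs =>
    let sc' := if c == first then sc + 1 else sc
    let nc' := if c == first then nc else nc + 1
    if sc' == nc' then cs else pvInnerA first sc' nc' cs

-- used by pvOuterA's decreasing_by
theorem pvInnerA_length (first : Char) (sc nc : Int) (l : List Char) :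
    (pvInnerA first sc nc l).length ≤ l.length := by
  induction l generalizing sc nc with
  | nil => simp [pvInnerA]
  | cons c cs ih =>
    simp only [pvInnerA, List.length_cons]
    split_ifs
    · omega
    · exact le_trans (ih _ _) (by omega)
    · omega
    · exact le_trans (ih _ _) (by omega)

-- outer while loop of A: each iteration runs the inner loop and adds 1 to answer.
def pvOuterA : List Char → Int
  | [] => 0
  | c :: cs => pvOuterA (pvInnerA c 1 0 cs) + 1
termination_by l => l.length
decreasing_by
  have := pvInnerA_length c 1 0 cs
  simp only [List.length_cons]
  omega

def solution (s : String) : Int := pvOuterA s.toList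

-- ===== PORT B =====
-- B's pairwise loop over `range(0, n-1, 2)` plus the trailing-character rule:
-- consuming the character list two at a time is exactly that index loop, and the
-- one-element case is the `n % 2 == 1` leftover test.
def pvPairB : List Char → Char → Int → Int → Int
  | [], _, _, ans => ans
  | [_], _, bal, ans => if bal == 0 then ans + 1 else ans
  | c1 :: c2 :: cs, f, bal, ans =>
    let f' := if bal == 0 then c1 else f
    let ans' := if bal == 0 then ans + 1 else ans
    pvPairB cs f' (bal + ((if c1 == f' then 1 else -1) + (if c2 == f' then 1 else -1))) ans'

def solution_alt (s : String) : Int := pvPairB s.toList ' ' 0 0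

-- ===== PRECONDITION & SPEC =====
def Spec_solution (s : String) (out : Int) : Prop := out = solution_alt s
instance (s : String) (out : Int) : Decidable (Spec_solution s out) := by unfold Spec_solution; infer_instance

-- ===== CLAIM (what is proved, stated in full; the proofs are below) =====
def Claim_equal_solution : Prop := ∀ (s : String), Dom_solution s → Spec_solution s (solution s)

-- ===== LEMMAS AND PROOFS =====

-- at balance 0 the carried `first` is irrelevant (it is overwritten immediately)
theorem pvPairB_zero_first (l : List Char) (f g : Char) (ans : Int) :
    pvPairB l f 0 ans = pvPairB l g 0 ans := by
  match l with
  | [] => rfl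
  | [_] => rfl
  | c1 :: c2 :: cs => simp [pvPairB]

-- B's pairwise loop during an open group (positive even balance sc - nc)
-- tracks A's inner loop: the balance can only vanish at pair boundaries.
theorem pvPairB_inner (n : Nat) : ∀ (l : List Char), l.length ≤ n →
    ∀ (first g : Char) (sc nc ans : Int), 0 < sc - nc → (sc - nc) % 2 = 0 →
    pvPairB l first (sc - nc) ans = pvPairB (pvInnerA first sc nc l) g 0 ans := by
  induction n with
  | zero =>
    intro l hl first g sc nc ans hpos _
    have : l = [] := List.eq_nil_of_length_eq_zero (by omega)
    subst this; rfl
  | succ n ih =>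
    intro l hl first g sc nc ans hpos heven
    have hne : (sc - nc == (0 : Int)) = false := by
      simp only [beq_eq_false_iff_ne, ne_eq]; omega
    match l with
    | [] => rfl
    | [c] =>
      -- one leftover character: the balance becomes odd, so no break, and both
      -- sides end with the current answer.
      have h1 : ((sc + 1 : Int) == nc) = false := by
        simp only [beq_eq_false_iff_ne, ne_eq]; omega
      have h2 : ((sc : Int) == nc + 1) = false := by
        simp only [beq_eq_false_iff_ne, ne_eq]; omega
      by_cases hc : c = first
      · simp [pvPairB, pvInnerA, hne, hc, h1]
      · simp [pvPairB, pvInnerA, hne, hc, h2]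
    | c1 :: c2 :: cs =>
      have hlen : cs.length ≤ n := by simp at hl; omega
      simp only [pvPairB, hne, Bool.false_eq_true, if_false]
      by_cases hc1 : c1 = first <;> by_cases hc2 : c2 = first
      · -- both match: balance + 2
        have hb1 : ¬((sc + 1 : Int) = nc) := by omega
        have hb2 : ¬((sc + 1 + 1 : Int) = nc) := by omega
        have e1 : pvInnerA first sc nc (c1 :: c2 :: cs)
            = pvInnerA first (sc + 1 + 1) nc cs := by
          simp [pvInnerA, hc1, hc2, hb1, hb2]
        rw [show sc - nc + ((if (c1 == first) = true then (1:Int) else -1)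
              + (if (c2 == first) = true then (1:Int) else -1)) = (sc + 1 + 1) - nc by
            simp [hc1, hc2]; try ring]
        rw [e1]
        exact ih cs hlen first g (sc + 1 + 1) nc ans (by omega) (by omega)
      · -- match then mismatch: balance unchanged
        have hb1 : ¬((sc + 1 : Int) = nc) := by omega
        have hb2 : ¬((sc + 1 : Int) = nc + 1) := by omega
        have e1 : pvInnerA first sc nc (c1 :: c2 :: cs)
            = pvInnerA first (sc + 1) (nc + 1) cs := by
          simp [pvInnerA, hc1, hc2, hb1, hb2]
        rw [show sc - nc + ((if (c1 == first) = true then (1:Int) else -1)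
              + (if (c2 == first) = true then (1:Int) else -1)) = (sc + 1) - (nc + 1) by
            simp [hc1, hc2]; try ring]
        rw [e1]
        exact ih cs hlen first g (sc + 1) (nc + 1) ans (by omega) (by omega)
      · -- mismatch then match: balance unchanged
        have hb1 : ¬((sc : Int) = nc + 1) := by omega
        have hb2 : ¬((sc + 1 : Int) = nc + 1) := by omega
        have e1 : pvInnerA first sc nc (c1 :: c2 :: cs)
            = pvInnerA first (sc + 1) (nc + 1) cs := by
          simp [pvInnerA, hc1, hc2, hb1, hb2]
        rw [show sc - nc + ((if (c1 == first) = true then (1:Int) else -1)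
              + (if (c2 == first) = true then (1:Int) else -1)) = (sc + 1) - (nc + 1) by
            simp [hc1, hc2]; try ring]
        rw [e1]
        exact ih cs hlen first g (sc + 1) (nc + 1) ans (by omega) (by omega)
      · -- both mismatch: balance - 2; the group may close here
        have hb1 : ¬((sc : Int) = nc + 1) := by omega
        by_cases hz : sc - nc = 2
        · have hb2 : ((sc : Int) = nc + 1 + 1) := by omega
          rw [show sc - nc + ((if (c1 == first) = true then (1:Int) else -1)
                + (if (c2 == first) = true then (1:Int) else -1)) = 0 by
              simp [hc1, hc2]; omega]
          have e1 : pvInnerA first sc nc (c1 :: c2 :: cs) = cs := by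
            simp [pvInnerA, hc1, hc2, hb1, hb2]
          rw [e1]
          exact pvPairB_zero_first cs first g ans
        · have hb2 : ¬((sc : Int) = nc + 1 + 1) := by omega
          have e1 : pvInnerA first sc nc (c1 :: c2 :: cs)
              = pvInnerA first sc (nc + 1 + 1) cs := by
            simp [pvInnerA, hb1, hb2, hc1, hc2]
          rw [show sc - nc + ((if (c1 == first) = true then (1:Int) else -1)
                + (if (c2 == first) = true then (1:Int) else -1)) = sc - (nc + 1 + 1) by
              simp [hc1, hc2]; try ring]
          rw [e1]
          exact ih cs hlen first g sc (nc + 1 + 1) ans (by omega) (by omega)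

theorem pvOuterA_eq_pairB_aux (n : Nat) : ∀ (l : List Char), l.length ≤ n →
    ∀ (g : Char) (ans : Int), pvPairB l g 0 ans = pvOuterA l + ans := by
  induction n with
  | zero =>
    intro l hl g ans
    have : l = [] := List.eq_nil_of_length_eq_zero (by omega)
    subst this; simp [pvPairB, pvOuterA]
  | succ n ih =>
    intro l hl g ans
    match l with
    | [] => simp [pvPairB, pvOuterA]
    | [c] =>
      have h1 : pvOuterA [c] = 1 := by
        rw [pvOuterA]; simp [pvInnerA, pvOuterA]
      simp [pvPairB, h1]; ring
    | c1 :: c2 :: cs =>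
      have hlcs : cs.length ≤ n := by simp at hl; omega
      simp only [pvPairB, beq_self_eq_true, reduceIte]
      by_cases hc2 : c2 = c1
      · -- second char matches the group head: balance 2, group still open
        have hb : ¬((1 + 1 : Int) = 0) := by omega
        have e1 : pvInnerA c1 1 0 (c2 :: cs) = pvInnerA c1 (1 + 1) 0 cs := by
          simp [pvInnerA, hc2, hb]
        rw [show (0:Int) + (1 + if (c2 == c1) = true then (1:Int) else -1) = (1 + 1) - 0 by
            simp [hc2]; try ring]
        rw [pvPairB_inner cs.length cs le_rfl c1 g (1 + 1) 0 (ans + 1) (by omega) (by omega)]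
        have hlen := pvInnerA_length c1 (1 + 1) 0 cs
        rw [ih _ (by omega) g (ans + 1)]
        conv_rhs => rw [pvOuterA]
        rw [e1]; ring
      · -- second char mismatches: the group closes immediately (length 2)
        have e1 : pvInnerA c1 1 0 (c2 :: cs) = cs := by
          simp [pvInnerA, hc2]
        rw [show (0:Int) + (1 + if (c2 == c1) = true then (1:Int) else -1) = 0 by
            simp [hc2]]
        rw [ih cs hlcs c1 (ans + 1)]
        conv_rhs => rw [pvOuterA]
        rw [e1]; ring

-- ===== VERDICT (by name: the statement is the Claim_ definition above) =====
theorem solution_spec : Claim_equal_solution := by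
  intro s _
  unfold Spec_solution solution solution_alt
  rw [pvOuterA_eq_pairB_aux s.toList.length s.toList le_rfl]
  ring
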